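-- pv_equiv track=rewrite | github.com/anthonyjk/DocuScurry | scraper.py | remove_nonword_leads
-- ===== SOURCE A (Python) =====
-- def remove_nonword_leads(text, flip=False):
-- 	"""
-- 	Removes all numbers or non-alphabet characters at beginning of each string in text array
--
-- 	string: given text array to modify
--
-- 	returns: modified text array
-- 	"""
-- 	if flip == True: # Flips each string to be backwards for end-of-string removals
-- 		for i in range(len(text)):
-- 			text[i] = text[i][::-1]
--
-- 	# Remove characters
-- 	for i in range(len(text)):
-- 		try:
-- 			while text[i][0].isdigit() or text[i][0] == ' ' or text[i][0].isalnum() == False: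
-- 				text[i] = text[i][1:]
-- 		except: pass
--
-- 	# Reflip each string to be readable again
-- 	if flip == True:
-- 		for i in range(len(text)):
-- 			text[i] = text[i][::-1]
--
-- 	return text
-- ===== SOURCE B (Python) =====
-- def remove_nonword_leads(text, flip=False):
-- 	"""Strip non-letter characters from one end of each string: the front, or the back when flip=True (mutates text in place)."""
-- 	for i, s in enumerate(text):
-- 		if flip:
-- 			while s and not s[-1].isalpha():
-- 				s = s[:-1]
-- 		else:
-- 			while s and not s[0].isalpha():
-- 				s = s[1:]
-- 		text[i] = s
-- 	return text
-- ===== Notes on version B (the rewrite author's own statement) =====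
-- stated objective: simpler
-- what changed: B branches on flip and strips non-letter characters from the correct end of each string directly, eliminating A's two whole-list reversal passes and the reverse/strip/reverse structure (and A's try/except around empty strings).
import Mathlib
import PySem

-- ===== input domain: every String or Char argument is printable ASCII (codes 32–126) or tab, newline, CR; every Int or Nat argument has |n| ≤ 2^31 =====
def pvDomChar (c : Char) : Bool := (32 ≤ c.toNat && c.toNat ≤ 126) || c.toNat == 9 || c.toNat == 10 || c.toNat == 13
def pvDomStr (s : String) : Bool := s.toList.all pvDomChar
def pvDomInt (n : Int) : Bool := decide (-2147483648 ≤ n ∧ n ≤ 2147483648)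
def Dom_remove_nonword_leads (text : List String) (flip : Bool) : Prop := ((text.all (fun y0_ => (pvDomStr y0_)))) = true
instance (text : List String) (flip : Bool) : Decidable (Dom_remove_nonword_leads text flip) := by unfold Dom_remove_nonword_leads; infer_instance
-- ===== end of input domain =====

-- B strips the correct end of each string directly (branching on flip) instead of A's reverse/strip/reverse,
-- removing the two reversal passes; objective: simpler. Both versions mutate the input list in Python; the
-- equivalence proved here is about the RETURN value only.


-- ===== PORT A =====
-- the while-condition: text[i][0].isdigit() or text[i][0] == ' ' or text[i][0].isalnum() == False
def predA (c : Char) : Bool :=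
  PySem.Chars.isdigit c || (c == ' ') || (PySem.Chars.isalnum c == false)

-- 'while pred(s[0]): s = s[1:]' with try/except: an empty string raises IndexError → pass (leaves it empty)
def stripA : List Char → List Char
  | [] => []
  | c :: cs => if predA c then stripA cs else c :: cs

def remove_nonword_leads (text : List String) (flip : Bool) : List String :=
  -- first pass: reverse each string when flip (s[::-1])
  let t1 := if flip = true then text.map (fun s => String.ofList s.toList.reverse) else text
  -- character-removal loop
  let t2 := t1.map (fun s => String.ofList (stripA s.toList))
  -- reflip
  if flip = true then t2.map (fun s => String.ofList s.toList.reverse) else t2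

-- ===== PORT B =====
-- 'while s and not s[0].isalpha(): s = s[1:]'
def bStripL : List Char → List Char
  | [] => []
  | c :: cs => if PySem.Chars.isalpha c then c :: cs else bStripL cs

-- 'while s and not s[-1].isalpha(): s = s[:-1]'
def bStripR (l : List Char) : List Char :=
  if h : l = [] then l
  else if PySem.Chars.isalpha (l.getLast h) then l
  else bStripR l.dropLast
termination_by l.length
decreasing_by
  have hpos : 0 < l.length := List.length_pos_of_ne_nil h
  rw [List.length_dropLast]; omega

def remove_nonword_leads_alt (text : List String) (flip : Bool) : List String :=
  text.map (fun s =>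
    if flip then String.ofList (bStripR s.toList) else String.ofList (bStripL s.toList))

-- ===== PRECONDITION & SPEC =====
def Spec_remove_nonword_leads (text : List String) (flip : Bool) (out : List String) : Prop := out = remove_nonword_leads_alt text flip
instance (text : List String) (flip : Bool) (out : List String) : Decidable (Spec_remove_nonword_leads text flip out) := by unfold Spec_remove_nonword_leads; infer_instance

-- ===== CLAIM (what is proved, stated in full; the proofs are below) =====
def Claim_equal_remove_nonword_leads : Prop := ∀ (text : List String) (flip : Bool), Dom_remove_nonword_leads text flip → Spec_remove_nonword_leads text flip (remove_nonword_leads text flip)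

-- ===== LEMMAS AND PROOFS =====

-- Under PySem's (ASCII-exact) character classes, A's strip condition is exactly "not a letter".
theorem predA_eq_not_isalpha (c : Char) : predA c = !PySem.Chars.isalpha c := by
  rw [Bool.eq_iff_iff]
  simp only [predA, PySem.Chars.isdigit, PySem.Chars.isalnum, PySem.Chars.isalpha,
    PySem.Chars.isupper, PySem.Chars.islower, Char.le_def, beq_iff_eq, Char.ext_iff,
    Bool.or_eq_true, Bool.and_eq_true, decide_eq_true_eq, Bool.not_eq_true']
  simp only [Bool.or_eq_false_iff, Bool.and_eq_false_iff, decide_eq_false_iff_not]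
  simp only [UInt32.le_iff_toNat_le, UInt32.ext_iff,
    show ('0'.val.toNat = 48) from by decide, show ('9'.val.toNat = 57) from by decide,
    show ('A'.val.toNat = 65) from by decide, show ('Z'.val.toNat = 90) from by decide,
    show ('a'.val.toNat = 97) from by decide, show ('z'.val.toNat = 122) from by decide,
    show (' '.val.toNat = 32) from by decide]
  omega

theorem stripA_eq_bStripL (l : List Char) : stripA l = bStripL l := by
  induction l with
  | nil => rfl
  | cons c cs ih =>
    simp only [stripA, bStripL, predA_eq_not_isalpha]
    cases h : PySem.Chars.isalpha c <;> simp [ih]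

theorem bStripR_reverse (l : List Char) : bStripR l = (bStripL l.reverse).reverse := by
  induction l using List.reverseRecOn with
  | nil => simp [bStripR, bStripL]
  | append_singleton as a ih =>
    rw [bStripR]
    simp only [List.reverse_append, List.reverse_cons, List.reverse_nil, List.nil_append,
      List.cons_append, bStripL]
    have hne : as ++ [a] ≠ [] := by simp
    simp only [dif_neg hne, List.getLast_append_singleton]
    cases h : PySem.Chars.isalpha a with
    | false => simp [ih]
    | true => simp

-- ===== VERDICT (by name: the statement is the Claim_ definition above) =====
theorem remove_nonword_leads_spec : Claim_equal_remove_nonword_leads := by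
  intro text flip _
  unfold Spec_remove_nonword_leads remove_nonword_leads remove_nonword_leads_alt
  cases flip with
  | false => simp [stripA_eq_bStripL]
  | true =>
    simp only [if_true, List.map_map]
    apply List.map_congr_left
    intro s _
    simp [Function.comp, bStripR_reverse, stripA_eq_bStripL, String.toList_ofList]
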